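-- pv_equiv track=rewrite | github.com/debuggerone/comako | src/services/aperak_generator.py | validate_aperak_structure
-- ===== SOURCE A (Python) =====
-- def validate_aperak_structure(aperak_message: str) -> bool:
--     """
--     Validate basic APERAK message structure.
--
--     Args:
--         aperak_message: APERAK message string
--
--     Returns:
--         True if structure is valid, False otherwise
--     """
--     try:
--         lines = aperak_message.strip().split('\n')
--
--         # Check minimum required segments
--         required_segments = ['UNB', 'UNH', 'BGM', 'UNT', 'UNZ']
--         found_segments = []
--
--         for line in lines:
--             if line.startswith(tuple(required_segments)):
--                 segment_type = line[:3]
--                 if segment_type not in found_segments: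
--                     found_segments.append(segment_type)
--
--         # Check all required segments are present
--         return all(seg in found_segments for seg in required_segments)
--
--     except Exception:
--         return False
-- ===== SOURCE B (Python) =====
-- def validate_aperak_structure(aperak_message: str) -> bool:
--     """Validate basic APERAK message structure (nested-scan re-implementation)."""
--     try:
--         lines = aperak_message.strip().split('\n')
--         required_segments = ['UNB', 'UNH', 'BGM', 'UNT', 'UNZ']
--         return all(any(line.startswith(seg) for line in lines)
--                    for seg in required_segments)
--     except Exception:
--         return False
-- ===== Notes on version B (the rewrite author's own statement) =====
-- stated objective: simpler
-- what changed: Replaces the single-pass construction of a deduplicated found_segments index (with prefix test, slicing line[:3] and membership filtering) by a direct nested quantifier: for each required segment, rescan the lines for one starting with it.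
import Mathlib
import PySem

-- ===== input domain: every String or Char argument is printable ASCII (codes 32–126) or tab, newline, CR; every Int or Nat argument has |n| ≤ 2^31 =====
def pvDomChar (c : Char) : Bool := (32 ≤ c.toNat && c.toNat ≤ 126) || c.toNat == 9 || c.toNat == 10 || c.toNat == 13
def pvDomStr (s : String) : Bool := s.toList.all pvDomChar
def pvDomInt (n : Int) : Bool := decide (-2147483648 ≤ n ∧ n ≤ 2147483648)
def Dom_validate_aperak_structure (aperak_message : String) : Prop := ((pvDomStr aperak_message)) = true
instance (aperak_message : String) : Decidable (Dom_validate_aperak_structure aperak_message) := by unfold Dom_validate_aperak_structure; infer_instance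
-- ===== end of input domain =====

-- B replaces A's single-pass dedup index of found segment types by a direct nested
-- scan (for each required segment, look for a line starting with it): simpler.

-- the required_segments list, shared verbatim by both Pythons
def pvReqSegs : List (List Char) :=
  [['U','N','B'], ['U','N','H'], ['B','G','M'], ['U','N','T'], ['U','N','Z']]

-- ===== PORT A =====
-- loop body of A's 'for line in lines'
def pvStepA (acc : List (List Char)) (line : List Char) : List (List Char) :=
  if pvReqSegs.any (fun seg => PySem.Chars.startswith line seg) then
    -- segType = line[:3], inlined
    if acc.contains (PySem.List.slice line none (some 3)) then acc
    else acc ++ [PySem.List.slice line none (some 3)]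
  else acc

def validate_aperak_structure (aperak_message : String) : Bool :=
  let lines := PySem.Chars.splitOn (PySem.Chars.strip aperak_message.toList) ['\n']
  let found := lines.foldl pvStepA []
  pvReqSegs.all (fun seg => found.contains seg)

-- ===== PORT B =====
def validate_aperak_structure_alt (aperak_message : String) : Bool :=
  let lines := PySem.Chars.splitOn (PySem.Chars.strip aperak_message.toList) ['\n']
  pvReqSegs.all (fun seg => lines.any (fun line => PySem.Chars.startswith line seg))

-- ===== PRECONDITION & SPEC =====
def Spec_validate_aperak_structure (aperak_message : String) (out : Bool) : Prop := out = validate_aperak_structure_alt aperak_message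
instance (aperak_message : String) (out : Bool) : Decidable (Spec_validate_aperak_structure aperak_message out) := by unfold Spec_validate_aperak_structure; infer_instance

-- ===== CLAIM (what is proved, stated in full; the proofs are below) =====
def Claim_equal_validate_aperak_structure : Prop := ∀ (aperak_message : String), Dom_validate_aperak_structure aperak_message → Spec_validate_aperak_structure aperak_message (validate_aperak_structure aperak_message)

-- ===== LEMMAS AND PROOFS =====

-- every required segment is three characters long
theorem pvReqSegs_len3 {seg : List Char} (h : seg ∈ pvReqSegs) : seg.length = 3 := by
  fin_cases h <;> rfl

-- for a 3-character segment, 'line.startswith(seg)' is 'line[:3] == seg'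
theorem pvStartswith_eq_slice3 (line seg : List Char) (h : seg.length = 3) :
    PySem.Chars.startswith line seg = (PySem.List.slice line none (some 3) == seg) := by
  rw [PySem.List.slice_to line (by norm_num : (0:Int) ≤ 3)]
  simp only [PySem.Chars.startswith]
  rcases Bool.eq_false_or_eq_true (line.take (3:Int).toNat == seg) with hb | hb
  · rw [hb]
    rw [beq_iff_eq] at hb
    simp only [List.isPrefixOf_iff_prefix, ← hb]
    exact List.take_prefix _ _
  · rw [hb]
    rw [beq_eq_false_iff_ne] at hb
    simp only [List.isPrefixOf_iff_prefix, Bool.eq_false_iff, ne_eq]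
    intro hp
    have h3 : (3:Int).toNat = 3 := rfl
    have : line.take (3:Int).toNat = seg := by
      rw [h3, List.prefix_iff_eq_take.mp hp, h]
    exact hb this

-- membership in A's accumulated found_segments, characterised
theorem pvFound_mem (lines : List (List Char)) (acc : List (List Char)) (seg : List Char)
    (hseg : seg ∈ pvReqSegs) :
    (seg ∈ lines.foldl pvStepA acc ↔
      seg ∈ acc ∨ ∃ l ∈ lines, PySem.Chars.startswith l seg = true) := by
  induction lines generalizing acc with
  | nil => simp
  | cons l rest ih =>
    simp only [List.foldl_cons, ih, List.mem_cons]
    have hkey : seg ∈ pvStepA acc l ↔ seg ∈ acc ∨ PySem.Chars.startswith l seg = true := by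
      unfold pvStepA
      split
      case isTrue hg =>
        rw [pvStartswith_eq_slice3 l seg (pvReqSegs_len3 hseg)]
        split
        case isTrue hc =>
          constructor
          · intro hm; exact Or.inl hm
          · rintro (hm | hm)
            · exact hm
            · simp only [beq_iff_eq] at hm
              rw [← hm]; exact List.contains_iff_mem.mp hc
        case isFalse hc =>
          simp only [List.mem_append, List.mem_singleton]
          constructor
          · rintro (hm | hm)
            · exact Or.inl hm
            · exact Or.inr (beq_iff_eq.mpr hm.symm)
          · rintro (hm | hm)
            · exact Or.inl hm
            · exact Or.inr (beq_iff_eq.mp hm).symm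
      case isFalse hg =>
        simp only [List.any_eq_true, not_exists, not_and, Bool.not_eq_true] at hg
        simp [hg seg hseg]
    constructor
    · rintro (h | ⟨x, hx, hsw⟩)
      · rcases hkey.mp h with h | h
        · exact Or.inl h
        · exact Or.inr ⟨l, Or.inl rfl, h⟩
      · exact Or.inr ⟨x, Or.inr hx, hsw⟩
    · rintro (h | ⟨x, hx | hx, hsw⟩)
      · exact Or.inl (hkey.mpr (Or.inl h))
      · exact Or.inl (hkey.mpr (Or.inr (hx ▸ hsw)))
      · exact Or.inr ⟨x, hx, hsw⟩

-- ===== VERDICT (by name: the statement is the Claim_ definition above) =====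
theorem validate_aperak_structure_spec : Claim_equal_validate_aperak_structure := by
  intro s _
  unfold Spec_validate_aperak_structure validate_aperak_structure validate_aperak_structure_alt
  rw [Bool.eq_iff_iff]
  simp only [List.all_eq_true, List.contains_iff_mem, List.any_eq_true]
  constructor <;> intro h seg hseg
  · exact ((pvFound_mem _ [] seg hseg).mp (h seg hseg)).resolve_left (by simp)
  · exact (pvFound_mem _ [] seg hseg).mpr (Or.inr (h seg hseg))
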